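-- pv_equiv track=rewrite | github.com/Auto-Mech/mechanalyzer | mechanalyzer/builder/checker.py | get_lone_spcs
-- ===== SOURCE A (Python) =====
-- from collections import Counter as counter
--
-- def get_lone_spcs(rxn_param_dct, threshold):
--     """ Get species that are considered "lone" species based on only
--         being included in a small number of reactions
--         (the cutoff for which is set by threshold).
--
--         Output each lone species and the reaction keys for
--         all reactions in which each lone species participates.
--
--         :param rxn_param_dct: rate constant parameters for a mechanism
--         :type rxn_param_dct: dct
--             {rxn1: (param_tuple1, param_tuple2, ...), rxn2: ...}
--         :param threshold: number of reactions at and below which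
--             a species is considered "lone"
--         :type threshold: int
--         :return lone_spcs: dictionary containing
--             each lone species and its reactions
--         :rtype: dct {lone_spc1: [rxn1, rxn2, ...], lone_spc2: ...}
--
--     """
--     # Get the number of reactions that each species participates in
--     all_rcts, all_prds = _get_rcts_prds(rxn_param_dct)
--     spc_counts = dict(counter(all_rcts + all_prds))
--
--     # Filter by the threshold
--     lone_spcs = {}
--     for spc, count in spc_counts.items():
--         if count <= threshold:
--             lone_spcs[spc] = []
--
--     # Store the reaction name(s) for each lone species
--     for spc, dct in lone_spcs.items():
--         for rxn in rxn_param_dct.keys():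
--             if spc in rxn[0] or spc in rxn[1]:  # whether spc in prds or rcts
--                 dct.append(rxn)
--
--     return lone_spcs
--
-- def _get_rcts_prds(rxn_param_dct):
--     """ Gets lists of all reactants and products in a mechanism
--         (both lists may contain duplicates)
--
--     :param rxn_param_dct: rate constant parameters for a mechanism
--     :return all_rcts: all reactants in the mechanism
--     :rtype: list [rct1, rct2, ...]
--     :return all_prds: all products in the mechanism
--     :rtype: list [prd1, prd2, ...]
--     """
--     all_rcts = []
--     all_prds = []
--     for rxn in rxn_param_dct.keys():
--         rcts, prds, _ = rxn
--         for rct in rcts: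
--             all_rcts.append(rct)
--         for prd in prds:
--             all_prds.append(prd)
--
--     return all_rcts, all_prds
-- ===== SOURCE B (Python) =====
-- def get_lone_spcs(rxn_param_dct, threshold):
--     """One pass builds an occurrence counter (reactants first, then products,
--     matching Counter key order) and a species->reactions index, so no
--     per-species rescan of the reaction list is needed."""
--     rxns = list(rxn_param_dct.keys())
--     counts = {}
--     for rcts, _, _ in rxns:
--         for spc in rcts:
--             counts[spc] = counts.get(spc, 0) + 1
--     for _, prds, _ in rxns:
--         for spc in prds:
--             counts[spc] = counts.get(spc, 0) + 1
--     index = {}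
--     for rxn in rxns:
--         for spc in dict.fromkeys(rxn[0] + rxn[1]):
--             index.setdefault(spc, []).append(rxn)
--     return {spc: index[spc] for spc, count in counts.items() if count <= threshold}
-- ===== Notes on version B (the rewrite author's own statement) =====
-- stated objective: faster
-- what changed: B builds a species-to-reactions index in a single pass over the reactions (each reaction appended once per distinct species it contains) and reads each lone species' reaction list out of the index, instead of A's rescan of the whole reaction list for every lone species.
import Mathlib
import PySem

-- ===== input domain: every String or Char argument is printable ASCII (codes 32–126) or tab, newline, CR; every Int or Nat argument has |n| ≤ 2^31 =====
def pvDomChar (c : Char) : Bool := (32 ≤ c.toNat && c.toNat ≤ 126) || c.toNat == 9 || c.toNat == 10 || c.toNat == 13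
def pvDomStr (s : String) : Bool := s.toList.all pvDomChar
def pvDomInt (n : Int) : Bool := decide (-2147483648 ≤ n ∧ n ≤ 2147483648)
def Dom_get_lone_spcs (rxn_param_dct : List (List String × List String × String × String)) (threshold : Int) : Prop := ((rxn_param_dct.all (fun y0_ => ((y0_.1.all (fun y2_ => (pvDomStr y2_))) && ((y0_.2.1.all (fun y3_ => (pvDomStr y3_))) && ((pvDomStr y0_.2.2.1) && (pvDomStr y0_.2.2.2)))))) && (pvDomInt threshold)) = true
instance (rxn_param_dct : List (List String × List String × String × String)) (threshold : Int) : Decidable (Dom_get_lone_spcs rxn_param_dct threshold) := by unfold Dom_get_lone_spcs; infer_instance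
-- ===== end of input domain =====

-- B replaces A's per-lone-species rescan of all reactions by a species→reactions
-- index built in one pass (objective: faster, asymptotically fewer scans).

-- Shared reading of the dict argument: 'for rxn in rxn_param_dct.keys()' —
-- the distinct reaction keys in first-insertion order.
def pvRxnKeys (rxn_param_dct : List (List String × List String × String × String)) :
    List (List String × List String × String) :=
  PySem.List.dedup (rxn_param_dct.map (fun q => (q.1, q.2.1, q.2.2.1)))

-- ===== PORT A =====
-- helper _get_rcts_prds: one loop over the reactions, appending each reactant
-- and product to the two accumulator lists
def pvGetRctsPrds (keys : List (List String × List String × String)) :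
    List String × List String :=
  keys.foldl
    (fun acc rxn =>
      (rxn.1.foldl (fun a r => a ++ [r]) acc.1,
       rxn.2.1.foldl (fun a p => a ++ [p]) acc.2))
    ([], [])

def get_lone_spcs (rxn_param_dct : List (List String × List String × String × String)) (threshold : Int) : List (String × List (List String × List String × String)) :=
  let keys := pvRxnKeys rxn_param_dct
  let rp := pvGetRctsPrds keys
  let spc_counts := PySem.Dict.counter (rp.1 ++ rp.2)
  -- filter by the threshold: lone species get an empty reaction list
  let lone_spcs : List (String × List (List String × List String × String)) :=
    spc_counts.items.foldl
      (fun acc p => if p.2 ≤ threshold then acc ++ [(p.1, [])] else acc) []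
  -- for each lone species, append every reaction containing it
  lone_spcs.map (fun p =>
    (p.1, keys.foldl
      (fun dct rxn => if p.1 ∈ rxn.1 ∨ p.1 ∈ rxn.2.1 then dct ++ [rxn] else dct)
      p.2))

-- ===== PORT B =====
def get_lone_spcs_alt (rxn_param_dct : List (List String × List String × String × String)) (threshold : Int) : List (String × List (List String × List String × String)) :=
  let rxns := pvRxnKeys rxn_param_dct
  -- occurrence counts: all reactant occurrences first, then all products
  let counts0 : PySem.Dict String Int :=
    rxns.foldl (fun d r => r.1.foldl (fun d s => d.insert s (d.getD s 0 + 1)) d)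
      PySem.Dict.empty
  let counts : PySem.Dict String Int :=
    rxns.foldl (fun d r => r.2.1.foldl (fun d s => d.insert s (d.getD s 0 + 1)) d)
      counts0
  -- species → reactions index (each reaction once per species it contains)
  let index : PySem.Dict String (List (List String × List String × String)) :=
    rxns.foldl
      (fun d r =>
        (PySem.List.dedup (r.1 ++ r.2.1)).foldl
          (fun d s => d.insert s (d.getD s [] ++ [r])) d)
      PySem.Dict.empty
  counts.items.filterMap (fun p =>
    if p.2 ≤ threshold then some (p.1, index.getD p.1 []) else none)

-- ===== PRECONDITION & SPEC =====
def Spec_get_lone_spcs (rxn_param_dct : List (List String × List String × String × String)) (threshold : Int) (out : List (String × List (List String × List String × String))) : Prop := out = get_lone_spcs_alt rxn_param_dct threshold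
instance (rxn_param_dct : List (List String × List String × String × String)) (threshold : Int) (out : List (String × List (List String × List String × String))) : Decidable (Spec_get_lone_spcs rxn_param_dct threshold out) := by unfold Spec_get_lone_spcs; infer_instance

-- ===== CLAIM (what is proved, stated in full; the proofs are below) =====
def Claim_equal_get_lone_spcs : Prop := ∀ (rxn_param_dct : List (List String × List String × String × String)) (threshold : Int), Dom_get_lone_spcs rxn_param_dct threshold → Spec_get_lone_spcs rxn_param_dct threshold (get_lone_spcs rxn_param_dct threshold)

-- ===== LEMMAS AND PROOFS =====

-- nested append loops over a list of lists are the loop over the flattening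
theorem pvFoldlNested {α β γ : Type} (l : List α) (g : α → List β)
    (f : γ → β → γ) (i : γ) :
    l.foldl (fun a x => (g x).foldl f a) i = (l.flatMap g).foldl f i := by
  induction l generalizing i with
  | nil => rfl
  | cons h t ih => simp [List.foldl_append, ih]

-- a filterMap with an if-some/none body is a map over a filter
theorem pvFilterMapIf {α β : Type} (l : List α) (p : α → Bool) (f : α → β) :
    l.filterMap (fun x => if p x then some (f x) else none) = (l.filter p).map f := by
  induction l with
  | nil => rfl
  | cons h t ih => by_cases hp : p h <;> simp [hp, ih]

theorem pvGetRctsPrds_eq (keys : List (List String × List String × String)) :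
    pvGetRctsPrds keys = (keys.flatMap (fun r => r.1), keys.flatMap (fun r => r.2.1)) := by
  unfold pvGetRctsPrds
  have hfun : (fun (acc : List String × List String)
        (rxn : List String × List String × String) =>
        (rxn.1.foldl (fun a r => a ++ [r]) acc.1,
         rxn.2.1.foldl (fun a p => a ++ [p]) acc.2))
      = fun acc rxn => (acc.1 ++ rxn.1, acc.2 ++ rxn.2.1) := by
    funext acc rxn
    rw [PySem.List.foldl_append_singleton, PySem.List.foldl_append_singleton]
  rw [hfun]
  suffices h : ∀ acc : List String × List String,
      keys.foldl (fun acc rxn => (acc.1 ++ rxn.1, acc.2 ++ rxn.2.1)) acc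
      = (acc.1 ++ keys.flatMap (fun r => r.1), acc.2 ++ keys.flatMap (fun r => r.2.1)) by
    simpa using h ([], [])
  induction keys with
  | nil => intro acc; simp
  | cons r t ih =>
    intro acc
    rw [List.foldl_cons, ih]
    simp [List.append_assoc]

theorem pvCounts_eq (rxns : List (List String × List String × String)) :
    rxns.foldl (fun d r => r.2.1.foldl (fun d s => d.insert s (d.getD s 0 + 1)) d)
      (rxns.foldl (fun d r => r.1.foldl (fun d s => d.insert s (d.getD s 0 + 1)) d)
        PySem.Dict.empty)
    = PySem.Dict.counter (rxns.flatMap (fun r => r.1) ++ rxns.flatMap (fun r => r.2.1)) := by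
  rw [pvFoldlNested, pvFoldlNested, ← List.foldl_append,
    PySem.Dict.foldl_insert_getD_add_one_eq_counter]

theorem pvIndexStep (l : List String) (hl : l.Nodup)
    (r : List String × List String × String)
    (d : PySem.Dict String (List (List String × List String × String))) (s : String) :
    (l.foldl (fun d s => d.insert s (d.getD s [] ++ [r])) d).getD s []
      = d.getD s [] ++ (if s ∈ l then [r] else []) := by
  induction l generalizing d with
  | nil => simp
  | cons a t ih =>
    simp only [List.foldl_cons]
    rw [ih (List.Nodup.of_cons hl)]
    by_cases hsa : s = a
    · subst hsa
      have hst : s ∉ t := (List.nodup_cons.mp hl).1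
      simp [hst]
    · simp [PySem.Dict.getD_insert, hsa, List.mem_cons]

theorem pvIndex_getD (rxns : List (List String × List String × String)) (s : String) :
    (rxns.foldl
      (fun d r =>
        (PySem.List.dedup (r.1 ++ r.2.1)).foldl
          (fun d s => d.insert s (d.getD s [] ++ [r])) d)
      PySem.Dict.empty).getD s []
    = rxns.filter (fun rxn => decide (s ∈ rxn.1 ∨ s ∈ rxn.2.1)) := by
  suffices h : ∀ d : PySem.Dict String (List (List String × List String × String)),
      (rxns.foldl
        (fun d r =>
          (PySem.List.dedup (r.1 ++ r.2.1)).foldl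
            (fun d s => d.insert s (d.getD s [] ++ [r])) d) d).getD s []
      = d.getD s [] ++ rxns.filter (fun rxn => decide (s ∈ rxn.1 ∨ s ∈ rxn.2.1)) by
    simpa using h PySem.Dict.empty
  induction rxns with
  | nil => intro d; simp
  | cons r t ih =>
    intro d
    simp only [List.foldl_cons, ih, pvIndexStep _ (PySem.List.nodup_dedup _) r d s,
      PySem.List.mem_dedup, List.filter_cons, List.mem_append]
    by_cases hs : s ∈ r.1 ∨ s ∈ r.2.1
    · simp [hs]
    · simp [not_or.mp hs]

theorem get_lone_spcs_spec : Claim_equal_get_lone_spcs := by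
  intro dct t _
  unfold Spec_get_lone_spcs
  simp only [get_lone_spcs, get_lone_spcs_alt]
  rw [pvGetRctsPrds_eq, pvCounts_eq]
  have hA := PySem.List.foldl_append_if (fun p : String × Int => decide (p.2 ≤ t))
    (fun p : String × Int => (p.1, ([] : List (List String × List String × String))))
    (PySem.Dict.counter ((pvRxnKeys dct).flatMap (fun r => r.1) ++
      (pvRxnKeys dct).flatMap (fun r => r.2.1))).items []
  simp only [decide_eq_true_eq] at hA
  rw [hA]
  have hC := pvFilterMapIf
    (PySem.Dict.counter ((pvRxnKeys dct).flatMap (fun r => r.1) ++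
      (pvRxnKeys dct).flatMap (fun r => r.2.1))).items
    (fun p : String × Int => decide (p.2 ≤ t))
    (fun p : String × Int =>
      (p.1,
        ((pvRxnKeys dct).foldl
          (fun d r =>
            (PySem.List.dedup (r.1 ++ r.2.1)).foldl
              (fun d s => d.insert s (d.getD s [] ++ [r])) d)
          PySem.Dict.empty).getD p.1 []))
  simp only [decide_eq_true_eq] at hC
  rw [hC]
  simp only [List.nil_append, List.map_map]
  apply List.map_congr_left
  intro p _
  have hB := PySem.List.foldl_append_if
    (fun rxn : List String × List String × String => decide (p.1 ∈ rxn.1 ∨ p.1 ∈ rxn.2.1))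
    id (pvRxnKeys dct) []
  simp only [decide_eq_true_eq, id_eq, List.map_id] at hB
  simp only [Function.comp]
  rw [hB, pvIndex_getD, List.nil_append]
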